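-- pv_equiv track=rewrite | github.com/yskang/AlgorithmPractice | baekjoon/python/penguin_drop_18228.py | solution
-- ===== SOURCE A (Python) =====
-- min_int = 10**10
--
-- def solution(n: int, ices: list):
--     left_min, right_min = min_int, min_int
--     left_found = False
--     for force in ices:
--         if left_found == False:
--             if force == -1:
--                 left_found = True
--                 continue
--             if force < left_min:
--                 left_min = force
--         else:
--             if force < right_min:
--                 right_min = force
--     return left_min+right_min
-- ===== SOURCE B (Python) =====
-- min_int = 10**10
--
-- def solution(n: int, ices: list):
--     idx = ices.index(-1) if -1 in ices else len(ices)
--     left_min = min(ices[:idx], default=min_int)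
--     right_min = min(ices[idx+1:], default=min_int)
--     return left_min + right_min
-- ===== Notes on version B (the rewrite author's own statement) =====
-- stated objective: idiomatic
-- what changed: Replaces the fused stateful scan (left/right accumulators plus a found flag) with a find-the-first--1 split and two independent min reductions over slices.
import Mathlib
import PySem

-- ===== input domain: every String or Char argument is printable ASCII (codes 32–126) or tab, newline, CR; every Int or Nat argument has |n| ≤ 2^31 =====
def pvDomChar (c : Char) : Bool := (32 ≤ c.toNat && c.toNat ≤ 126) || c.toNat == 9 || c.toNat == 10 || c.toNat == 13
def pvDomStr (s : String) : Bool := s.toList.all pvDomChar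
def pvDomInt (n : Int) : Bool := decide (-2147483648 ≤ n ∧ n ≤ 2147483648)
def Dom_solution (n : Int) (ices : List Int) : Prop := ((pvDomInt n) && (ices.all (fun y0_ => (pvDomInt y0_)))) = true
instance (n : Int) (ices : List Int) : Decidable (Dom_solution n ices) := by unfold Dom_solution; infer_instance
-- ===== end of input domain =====

-- B replaces A's fused stateful scan with find-first--1 then two independent min reductions (idiomatic decomposition).

def min_int : Int := 10 ^ 10

-- ===== PORT A =====
-- step of A's loop: state = (left_min, right_min, left_found)
def solutionStep (s : Int × Int × Bool) (force : Int) : Int × Int × Bool :=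
  if s.2.2 = false then
    if force = -1 then (s.1, s.2.1, true)
    else if force < s.1 then (force, s.2.1, s.2.2)
    else s
  else
    if force < s.2.1 then (s.1, force, s.2.2)
    else s

def solution (n : Int) (ices : List Int) : Int :=
  let st := ices.foldl solutionStep (min_int, min_int, false)
  st.1 + st.2.1

-- ===== PORT B =====
def solution_alt (n : Int) (ices : List Int) : Int :=
  let idx : Int :=
    match PySem.List.index? ices (-1 : Int) with
    | some i => (i : Int)
    | none => (ices.length : Int)
  let left_min := (PySem.List.min? (PySem.List.slice ices none (some idx)) (fun x => x)).getD min_int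
  let right_min := (PySem.List.min? (PySem.List.slice ices (some (idx + 1)) none) (fun x => x)).getD min_int
  left_min + right_min

-- ===== PRECONDITION & SPEC =====
def Spec_solution (n : Int) (ices : List Int) (out : Int) : Prop := out = solution_alt n ices
instance (n : Int) (ices : List Int) (out : Int) : Decidable (Spec_solution n ices out) := by unfold Spec_solution; infer_instance

-- ===== CLAIM (what is proved, stated in full; the proofs are below) =====
def Claim_equal_solution : Prop := ∀ (n : Int) (ices : List Int), Dom_solution n ices → Spec_solution n ices (solution n ices)

-- ===== LEMMAS AND PROOFS =====

theorem step_true (lm rm x : Int) : solutionStep (lm, rm, true) x = (lm, min rm x, true) := by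
  unfold solutionStep
  split_ifs with h <;> simp_all [min_def]

theorem step_false_ne (lm rm x : Int) (hx : x ≠ -1) :
    solutionStep (lm, rm, false) x = (min lm x, rm, false) := by
  unfold solutionStep
  split_ifs with h1 h2 h3 <;> simp_all [min_def]

theorem step_false_neg1 (lm rm : Int) : solutionStep (lm, rm, false) (-1) = (lm, rm, true) := by
  simp [solutionStep]

-- Lean's foldl min characterised by PySem's min?
theorem foldl_min_eq_min? (l : List Int) (init : Int) :
    l.foldl min init = (PySem.List.min? l (fun x => x)).elim init (fun m => min init m) := by
  induction l generalizing init with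
  | nil => simp [PySem.List.min?]
  | cons y t ih =>
    rw [List.foldl_cons, PySem.List.min?_id_cons, ih, ih]
    cases ht : PySem.List.min? t (fun x => x) <;> simp [Option.elim] <;> try omega

-- A's loop before any -1 is seen
theorem foldA_notfound (l : List Int) (lm rm : Int) (h : (-1 : Int) ∉ l) :
    l.foldl solutionStep (lm, rm, false) = (l.foldl min lm, rm, false) := by
  induction l generalizing lm with
  | nil => simp
  | cons x t ih =>
    simp only [List.mem_cons, not_or] at h
    rw [List.foldl_cons, List.foldl_cons, step_false_ne _ _ _ (fun hc => h.1 hc.symm), ih _ h.2]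

-- A's loop after -1 was seen
theorem foldA_found (l : List Int) (lm rm : Int) :
    l.foldl solutionStep (lm, rm, true) = (lm, l.foldl min rm, true) := by
  induction l generalizing rm with
  | nil => simp
  | cons x t ih => rw [List.foldl_cons, List.foldl_cons, step_true, ih]

-- under the domain bound, folding min from min_int equals min? with default min_int
theorem foldl_min_getD (l : List Int) (hd : ∀ x ∈ l, x ≤ 2147483648) :
    l.foldl min min_int = (PySem.List.min? l (fun x => x)).getD min_int := by
  rw [foldl_min_eq_min?]
  cases hm : PySem.List.min? l (fun x => x) with
  | none => rfl
  | some m =>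
    have hmem := PySem.List.min?_mem hm
    have := hd m hmem
    simp [min_int]
    omega

-- ===== VERDICT (by name: the statement is the Claim_ definition above) =====
theorem solution_spec : Claim_equal_solution := by
  intro n ices hdom
  have hbound : ∀ x ∈ ices, x ≤ 2147483648 := by
    unfold Dom_solution pvDomInt at hdom
    simp [List.all_eq_true] at hdom
    intro x hx
    exact (hdom.2 x hx).2
  unfold Spec_solution solution solution_alt
  cases hidx : PySem.List.index? ices (-1 : Int) with
  | none =>
    have hnot : (-1 : Int) ∉ ices := by
      rw [← PySem.List.index?_eq_none_iff (xs := ices) (v := (-1 : Int))]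
      exact hidx
    rw [foldA_notfound _ _ _ hnot]
    have hsl1 : PySem.List.slice ices none (some ((ices.length : Nat) : Int)) = ices := by
      rw [PySem.List.slice_to_natCast, List.take_length]
    have hsl2 : PySem.List.slice ices (some (((ices.length : Nat) : Int) + 1)) none = [] := by
      rw [show ((ices.length : Nat) : Int) + 1 = (((ices.length + 1 : Nat)) : Int) by push_cast; ring,
        PySem.List.slice_from_natCast]
      simp
    simp only [hsl1, hsl2]
    rw [foldl_min_getD ices hbound]
    simp [PySem.List.min?]
  | some k =>
    obtain ⟨pre, suf, heq, hlen, hnotpre⟩ :=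
      (PySem.List.index?_eq_some_iff (xs := ices) (v := (-1 : Int)) (k := k)).mp hidx
    subst heq
    subst hlen
    have hsl1 : PySem.List.slice (pre ++ -1 :: suf) none (some ((pre.length : Nat) : Int)) = pre := by
      rw [PySem.List.slice_to_natCast, List.take_left]
    have hsl2 : PySem.List.slice (pre ++ -1 :: suf) (some (((pre.length : Nat) : Int) + 1)) none = suf := by
      rw [show ((pre.length : Nat) : Int) + 1 = (((pre.length + 1 : Nat)) : Int) by push_cast; ring,
        PySem.List.slice_from_natCast,
        show pre ++ -1 :: suf = (pre ++ [-1]) ++ suf by simp,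
        List.drop_left' (by simp)]
    simp only [hsl1, hsl2]
    rw [List.foldl_append, foldA_notfound _ _ _ hnotpre, List.foldl_cons, step_false_neg1,
      foldA_found]
    have hb1 : ∀ x ∈ pre, x ≤ 2147483648 := fun x hx => hbound x (by simp [hx])
    have hb2 : ∀ x ∈ suf, x ≤ 2147483648 := fun x hx => hbound x (by simp [hx])
    rw [foldl_min_getD pre hb1, foldl_min_getD suf hb2]
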